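-- pv_equiv track=rewrite | github.com/Choi1234567/Acm_specil.data.Structure | Acm_special/4.2. Game with Numbers（heap）.py | process
-- ===== SOURCE A (Python) =====
-- import heapq  # 堆又有一个名字，叫优先队列，他的堆顶，或者说优先队列的第一个元素，永远都是最大值或最小值
--
-- def process(lst, l):#lst数组，l数组长度
--     if l == 0:#特殊情况
--         return 0
--     count = 0
--     max_pq = []
--     min_num = lst[0]
--     for i in lst:#用最普遍的方法求出最小值,Find the minimum value by the most general method
--         if i < min_num:
--             min_num = i
--         heapq.heappush(max_pq, -i)#每次遍历得时候，都把-i，用堆得形式，放到max_pq这个数组里面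
--     max_num = -max_pq[0]#这个函数，默认是构建小根堆得，所以我们用-i，就变成构建了大根堆了
--     if max_num == min_num:
--         return 0
--     while min_num < max_num:
--         if max_num > 2 * min_num:#最大值大于2*min_num的时候，相减，最小值不会变，最大值小于2*最小值的时候，相减，最小值会变化
--             c = max_num // min_num - 1
--             num = max_num - c * min_num
--             count += c
--             heapq.heapreplace(max_pq, -num)#取出最大值，然后把num塞堆里
--             max_num = -max_pq[0]
--         else:#max_num <= 2 * min_num的时候，最小值也发生变化了
--             num = max_num - min_num
--             min_num = num
--             count += 1
--             heapq.heapreplace(max_pq, -num)#塞到堆里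
--             max_num = -max_pq[0]##重新取出新的最大值
--     return count
-- ===== SOURCE B (Python) =====
-- def process(lst, l):
--     if l == 0:
--         return 0
--     nums = list(lst)
--     min_num = min(nums)
--     max_num = max(nums)
--     if max_num == min_num:
--         return 0
--     count = 0
--     while min_num < max_num:
--         i = nums.index(max_num)
--         if max_num > 2 * min_num:
--             c = max_num // min_num - 1
--             nums[i] = max_num - c * min_num
--             count += c
--         else:
--             min_num = max_num - min_num
--             nums[i] = min_num
--             count += 1
--         max_num = max(nums)
--     return count
-- ===== Notes on version B (the rewrite author's own statement) =====
-- stated objective: simpler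
-- what changed: B drops the heapq max-heap entirely: it keeps a plain list, finds the current maximum with a linear max()/index() scan and writes the reduced value back in place, while keeping the same two-branch Euclidean count arithmetic.
import Mathlib
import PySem

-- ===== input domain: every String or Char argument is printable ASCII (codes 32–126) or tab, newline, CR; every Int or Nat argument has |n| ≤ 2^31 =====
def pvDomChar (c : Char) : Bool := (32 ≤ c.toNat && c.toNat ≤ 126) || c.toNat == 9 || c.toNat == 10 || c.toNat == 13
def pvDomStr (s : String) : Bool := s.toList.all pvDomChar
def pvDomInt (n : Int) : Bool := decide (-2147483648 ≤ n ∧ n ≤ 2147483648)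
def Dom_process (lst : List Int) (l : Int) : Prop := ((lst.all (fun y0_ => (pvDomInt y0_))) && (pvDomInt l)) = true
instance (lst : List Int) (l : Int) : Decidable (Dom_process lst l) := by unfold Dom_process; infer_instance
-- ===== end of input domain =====

-- B replaces A's heapq max-heap by a plain list with a linear max scan and an in-place
-- write-back at the max's index (objective: simpler — no heap machinery, same count arithmetic).

-- ===== PORT A =====
-- heapq is modelled by behaviour as a min-ordered list: only heap[0] is ever read by A, and it
-- equals Python's heap[0] (the minimum) exactly; push/replace keep the same multiset as heapq's.
def heapPush (h : List Int) (x : Int) : List Int := List.orderedInsert (· ≤ ·) x h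

def heapReplace (h : List Int) (x : Int) : List Int := List.orderedInsert (· ≤ ·) x h.tail

-- fuel: a totality guard only, identical in both ports (on inputs inside Pre_ every Python
-- iteration strictly decreases the positive list sum, so the bound is never reached there)
def pvFuel (lst : List Int) : Nat := lst.foldl (fun a x => a + x.toNat) 0 + lst.length + 1

-- the 'while min_num < max_num' loop of A (state: heap of negated values, min_num, max_num, count)
def aLoop : Nat → List Int → Int → Int → Int → Int
  | 0, _, _, _, count => count
  | fuel+1, heap, minN, maxN, count =>
    if minN < maxN then
      if maxN > 2 * minN then
        let c := PySem.Int.floordiv maxN minN - 1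
        let num := maxN - c * minN
        let h' := heapReplace heap (-num)
        aLoop fuel h' minN (-((h'.head?).getD 0)) (count + c)
      else
        let num := maxN - minN
        let h' := heapReplace heap (-num)
        aLoop fuel h' num (-((h'.head?).getD 0)) (count + 1)
    else count

def process (lst : List Int) (l : Int) : Int :=
  if l = 0 then 0 else
  -- the single 'for i in lst' loop of A: running-min scan + heappush of -i
  let st := lst.foldl (fun (s : Int × List Int) i =>
      (if i < s.1 then i else s.1, heapPush s.2 (-i)))
      ((PySem.List.pyGet? lst 0).getD 0, [])
  let maxN := -((st.2.head?).getD 0)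
  if maxN = st.1 then 0 else aLoop (pvFuel lst) st.2 st.1 maxN 0

-- ===== PORT B =====
-- the 'while min_num < max_num' loop of B (state: plain list, min_num, max_num, count)
def bLoop : Nat → List Int → Int → Int → Int → Int
  | 0, _, _, _, count => count
  | fuel+1, nums, minN, maxN, count =>
    if minN < maxN then
      let i := (PySem.List.index? nums maxN).getD 0
      if maxN > 2 * minN then
        let c := PySem.Int.floordiv maxN minN - 1
        let nums' := nums.set i (maxN - c * minN)
        bLoop fuel nums' minN ((PySem.List.max? nums' (fun y => y)).getD 0) (count + c)
      else
        let m := maxN - minN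
        let nums' := nums.set i m
        bLoop fuel nums' m ((PySem.List.max? nums' (fun y => y)).getD 0) (count + 1)
    else count

def process_alt (lst : List Int) (l : Int) : Int :=
  if l = 0 then 0 else
  let minN := (PySem.List.min? lst (fun y => y)).getD 0
  let maxN := (PySem.List.max? lst (fun y => y)).getD 0
  if maxN = minN then 0
  else bLoop (pvFuel lst) lst minN maxN 0

-- ===== PRECONDITION & SPEC =====
-- Pre_ excludes exactly the inputs where Python A raises: l ≠ 0 with an empty list (IndexError
-- at lst[0]) and lists whose minimum is 0 while some element is positive (ZeroDivisionError).
def Pre_process (lst : List Int) (l : Int) : Prop :=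
  l = 0 ∨ (lst ≠ [] ∧ ¬ ((0:Int) ∈ lst ∧ (∀ x ∈ lst, 0 ≤ x) ∧ ∃ x ∈ lst, 0 < x))

instance (lst : List Int) (l : Int) : Decidable (Pre_process lst l) := by
  unfold Pre_process; infer_instance

def pvWitness_process : List Int × Int := ([3, 9, 2], 3)

def Spec_process (lst : List Int) (l : Int) (out : Int) : Prop := out = process_alt lst l
instance (lst : List Int) (l : Int) (out : Int) : Decidable (Spec_process lst l out) := by
  unfold Spec_process; infer_instance

-- ===== CLAIM (what is proved, stated in full; the proofs are below) =====
def Claim_equal_process : Prop := ∀ (lst : List Int) (l : Int), Dom_process lst l → Pre_process lst l → Spec_process lst l (process lst l)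

-- ===== LEMMAS AND PROOFS =====

-- head of the (sorted, negated) heap is the maximum of any list with the same multiset
lemma topEq (heap nums : List Int) (hs : heap.Pairwise (· ≤ ·))
    (hp : (heap.map (fun x => -x)).Perm nums) (hne : nums ≠ []) :
    -((heap.head?).getD 0) = (PySem.List.max? nums (fun y => y)).getD 0 := by
  cases hp2 : heap with
  | nil => subst hp2; exact absurd (List.Perm.eq_nil (by simpa using hp.symm)) hne
  | cons h0 t =>
    subst hp2
    obtain ⟨M, hM⟩ : ∃ M, PySem.List.max? nums (fun y => y) = some M := by
      cases hmx : PySem.List.max? nums (fun y => y) with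
      | none => exact absurd ((PySem.List.max?_eq_none_iff nums _).mp hmx) hne
      | some M => exact ⟨M, rfl⟩
    have hMmem := PySem.List.max?_mem hM
    have hMmax := PySem.List.max?_isMax hM
    have h1 : -h0 ∈ nums := hp.mem_iff.mp (by simp)
    have h2 : (-M : Int) ∈ h0 :: t := by
      have : M ∈ (h0 :: t).map (fun x => -x) := hp.mem_iff.mpr hMmem
      obtain ⟨x, hx, hxe⟩ := List.mem_map.mp this
      have : x = -M := by omega
      exact this ▸ hx
    have h3 : h0 ≤ -M := by
      rcases List.mem_cons.mp h2 with h | h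
      · omega
      · exact (List.pairwise_cons.mp hs).1 _ h
    have h4 : -h0 ≤ M := hMmax _ h1
    simp [hM]
    omega

lemma set_append_length (pre suf : List Int) (x v : Int) :
    (pre ++ x :: suf).set pre.length v = pre ++ v :: suf := by
  induction pre with
  | nil => rfl
  | cons a t ih => simp [ih]

-- the two while-loops agree whenever the heap (negated) and the plain list hold the same multiset
lemma loop_eq (fuel : Nat) : ∀ (heap nums : List Int) (minN count : Int),
    heap.Pairwise (· ≤ ·) → (heap.map (fun x => -x)).Perm nums → nums ≠ [] →
    aLoop fuel heap minN (-((heap.head?).getD 0)) count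
      = bLoop fuel nums minN ((PySem.List.max? nums (fun y => y)).getD 0) count := by
  induction fuel with
  | zero => intros; rfl
  | succ fuel ih =>
    intro heap nums minN count hs hp hne
    rw [← topEq heap nums hs hp hne]
    cases hp2 : heap with
    | nil => subst hp2; exact absurd (List.Perm.eq_nil (by simpa using hp.symm)) hne
    | cons h0 t =>
    subst hp2
    have hts : t.Pairwise (· ≤ ·) := (List.pairwise_cons.mp hs).2
    have hMmem : -h0 ∈ nums := hp.mem_iff.mp (by simp)
    obtain ⟨i, hi⟩ : ∃ i, PySem.List.index? nums (-h0) = some i := by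
      have := (PySem.List.index?_isSome_iff nums (-h0)).mpr hMmem
      exact Option.isSome_iff_exists.mp this
    obtain ⟨pre, suf, hnd, hlen, -⟩ := (PySem.List.index?_eq_some_iff nums (-h0) i).mp hi
    have htperm : (t.map (fun x => -x)).Perm (pre ++ suf) := by
      have h1 : ((h0 :: t).map (fun x => -x)).Perm (-h0 :: (pre ++ suf)) := by
        refine hp.trans ?_
        rw [hnd]
        exact List.perm_middle
      simpa using h1.cons_inv
    have hset : ∀ v : Int, nums.set i v = pre ++ v :: suf := by
      intro v; rw [hnd, ← hlen, set_append_length]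
    have hsetperm : ∀ v : Int, ((heapReplace (h0 :: t) (-v)).map (fun x => -x)).Perm (nums.set i v) := by
      intro v
      have h1 : (heapReplace (h0 :: t) (-v)).Perm ((-v) :: t) :=
        List.perm_orderedInsert _ _ _
      have h2 := h1.map (fun x : Int => -x)
      simp only [List.map_cons, neg_neg] at h2
      refine h2.trans ?_
      rw [hset v]
      exact (List.Perm.cons v htperm).trans List.perm_middle.symm
    have hsetsorted : ∀ v : Int, (heapReplace (h0 :: t) (-v)).Pairwise (· ≤ ·) := by
      intro v; exact List.Pairwise.orderedInsert _ _ hts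
    have hsetne : ∀ v : Int, nums.set i v ≠ [] := by
      intro v; rw [hset v]; exact List.append_ne_nil_of_right_ne_nil _ (by simp)
    simp only [aLoop, bLoop, List.head?_cons, Option.getD_some, hi]
    split_ifs with hlt hbig
    · exact ih _ _ _ _ (hsetsorted _) (hsetperm _) (hsetne _)
    · exact ih _ _ _ _ (hsetsorted _) (hsetperm _) (hsetne _)
    · rfl

-- A's heap-building fold yields a sorted heap …
lemma buildSorted : ∀ (l h : List Int), h.Pairwise (· ≤ ·) →
    (l.foldl (fun h i => heapPush h (-i)) h).Pairwise (· ≤ ·)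
  | [], _, hh => hh
  | _ :: t, _, hh => buildSorted t _ (List.Pairwise.orderedInsert _ _ hh)

-- … holding exactly the negated input elements
lemma buildPerm : ∀ (l h : List Int),
    ((l.foldl (fun h i => heapPush h (-i)) h).map (fun x => -x)).Perm (h.map (fun x => -x) ++ l) := by
  intro l
  induction l with
  | nil => intro h; simp
  | cons x t ih =>
    intro h
    simp only [List.foldl_cons]
    refine (ih (heapPush h (-x))).trans ?_
    have h1 : (heapPush h (-x)).Perm ((-x) :: h) := List.perm_orderedInsert _ _ _
    have h2 := (h1.map (fun y : Int => -y)).append_right t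
    simp only [List.map_cons, neg_neg] at h2
    exact h2.trans List.perm_middle.symm

-- A's running-min scan is Python's min()
lemma minFold (x : Int) (t : List Int) :
    t.foldl (fun m i => if i < m then i else m) x = t.foldl min x := by
  refine PySem.List.foldl_congr_mem t _ _ x ?_
  intro m i _
  rw [min_def]
  split_ifs <;> omega

-- ===== VERDICT (by name: the statement is the Claim_ definition above) =====
theorem process_spec : Claim_equal_process := by
  unfold Claim_equal_process
  intro lst l _ hpre
  unfold Spec_process process process_alt
  by_cases hl : l = 0
  · simp [hl]
  · simp only [if_neg hl]
    have hne : lst ≠ [] := by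
      rcases hpre with h | ⟨h, -⟩
      · exact absurd h hl
      · exact h
    obtain ⟨x, t, rfl⟩ := List.exists_cons_of_ne_nil hne
    rw [PySem.List.foldl_prod_mk (f := fun m i => if i < m then i else m)
      (g := fun h i => heapPush h (-i))]
    have hsorted := buildSorted (x :: t) [] (by simp)
    have hperm : (((x :: t).foldl (fun h i => heapPush h (-i)) []).map (fun y => -y)).Perm (x :: t) := by
      simpa using buildPerm (x :: t) []
    have hmax := topEq _ _ hsorted hperm (by simp)
    have hmin : (x :: t).foldl (fun m i => if i < m then i else m)
        ((PySem.List.pyGet? (x :: t) 0).getD 0)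
        = (PySem.List.min? (x :: t) (fun y => y)).getD 0 := by
      rw [PySem.List.min?_id_cons, PySem.List.pyGet?_zero_cons]
      simp only [Option.getD_some, List.foldl_cons, lt_irrefl]
      exact minFold x t
    simp only [hmax, hmin]
    split_ifs with heq
    · rfl
    · conv_lhs => rw [← hmax]
      exact loop_eq (pvFuel (x :: t)) _ _ _ _ hsorted hperm (by simp)
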